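-- pv_equiv track=rewrite | github.com/guest1024/Diablo2-data | app/chroma_store.py | _features
-- ===== SOURCE A (Python) =====
-- def _features(text: str) -> list[str]:
--     lowered = text.lower()
--     ascii_tokens = [
--         token
--         for token in "".join(ch if ch.isalnum() else " " for ch in lowered).split()
--         if len(token) >= 2
--     ]
--     compact = "".join(ch for ch in lowered if not ch.isspace())
--     chargrams = [compact[idx : idx + 3] for idx in range(max(0, len(compact) - 2))]
--     return ascii_tokens + chargrams
-- ===== SOURCE B (Python) =====
-- def _features(text: str) -> list[str]:
--     lowered = text.lower()
--     feats = []
--     i, n = 0, len(lowered)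
--     while i < n:
--         key = lowered[i].isalnum()
--         j = i + 1
--         while j < n and lowered[j].isalnum() == key:
--             j += 1
--         if key and j - i >= 2:
--             feats.append(lowered[i:j])
--         i = j
--     compact = "".join(ch for ch in lowered if not ch.isspace())
--     feats.extend(map("".join, zip(compact, compact[1:], compact[2:])))
--     return feats
-- ===== Notes on version B (the rewrite author's own statement) =====
-- stated objective: alternative
-- what changed: Tokens are extracted by a single groupby-style scan over the lowered text (spans of equal isalnum key) instead of masking non-alnum chars to spaces, joining and re-splitting; trigrams come from zipping compact with its two tail slices instead of index-range slicing.
import Mathlib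
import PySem

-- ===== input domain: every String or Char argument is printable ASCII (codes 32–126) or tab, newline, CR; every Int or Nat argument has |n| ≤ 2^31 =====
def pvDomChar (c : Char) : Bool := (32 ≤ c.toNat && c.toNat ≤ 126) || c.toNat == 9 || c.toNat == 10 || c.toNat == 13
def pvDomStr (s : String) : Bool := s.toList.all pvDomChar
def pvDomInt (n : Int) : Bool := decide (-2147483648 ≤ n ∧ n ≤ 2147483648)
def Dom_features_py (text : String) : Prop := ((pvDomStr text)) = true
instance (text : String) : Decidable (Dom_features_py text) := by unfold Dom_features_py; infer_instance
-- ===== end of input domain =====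

-- B replaces A's mask-join-split token pass by one groupby-style scan and index-range slicing by a zip of tail slices (objective: alternative decomposition, same cost).

-- ===== PORT A =====
def features_py (text : String) : List String :=
  let lowered := PySem.Chars.lower text.toList
  let asciiTokens :=
    ((PySem.Chars.split₀
        (lowered.map (fun ch => if PySem.Chars.isalnum ch then ch else ' '))).filter
      (fun token => 2 ≤ token.length)).map String.ofList
  let compact := lowered.filter (fun ch => !PySem.Chars.isspace ch)
  let chargrams :=
    (PySem.List.pyRange 0 (max 0 ((compact.length : Int) - 2)) 1).map
      (fun idx => String.ofList (PySem.List.slice compact (some idx) (some (idx + 3))))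
  asciiTokens ++ chargrams

-- ===== PORT B =====
-- groupby-style scan: span off the run of chars sharing the head's isalnum key,
-- keep alnum runs of length ≥ 2 as tokens
def pvTokenRuns (cs : List Char) : List String :=
  match cs with
  | [] => []
  | c :: rest =>
    let key := PySem.Chars.isalnum c
    let grp := c :: rest.takeWhile (fun x => PySem.Chars.isalnum x == key)
    if key && 2 ≤ grp.length then
      String.ofList grp :: pvTokenRuns (rest.dropWhile (fun x => PySem.Chars.isalnum x == key))
    else
      pvTokenRuns (rest.dropWhile (fun x => PySem.Chars.isalnum x == key))
termination_by cs.length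
decreasing_by
  · exact Nat.lt_succ_of_le (List.length_dropWhile_le _ _)
  · exact Nat.lt_succ_of_le (List.length_dropWhile_le _ _)

def features_py_alt (text : String) : List String :=
  let lowered := PySem.Chars.lower text.toList
  let compact := lowered.filter (fun ch => !PySem.Chars.isspace ch)
  pvTokenRuns lowered ++
    ((compact.zip ((PySem.List.slice compact (some 1) none).zip
        (PySem.List.slice compact (some 2) none))).map
      (fun p => String.ofList [p.1, p.2.1, p.2.2]))

-- ===== PRECONDITION & SPEC =====
def Spec_features_py (text : String) (out : List String) : Prop := out = features_py_alt text
instance (text : String) (out : List String) : Decidable (Spec_features_py text out) := by unfold Spec_features_py; infer_instance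

-- ===== CLAIM (what is proved, stated in full; the proofs are below) =====
def Claim_equal_features_py : Prop := ∀ (text : String), Dom_features_py text → Spec_features_py text (features_py text)

-- ===== LEMMAS AND PROOFS =====

-- the alnum runs of cs (A's split of the masked string, characterised directly)
def pvD (cs : List Char) : List (List Char) :=
  match cs with
  | [] => []
  | c :: rest =>
    if PySem.Chars.isalnum c then
      (c :: rest.takeWhile PySem.Chars.isalnum) :: pvD (rest.dropWhile PySem.Chars.isalnum)
    else pvD rest
termination_by cs.length
decreasing_by
  · exact Nat.lt_succ_of_le (List.length_dropWhile_le _ _)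
  · exact Nat.lt_succ_of_le (Nat.le_refl _)

theorem pv_alnum_not_space (c : Char) (h : PySem.Chars.isalnum c = true) :
    PySem.Chars.isspace c = false := by
  simp [PySem.Chars.isalnum, PySem.Chars.isalpha, PySem.Chars.isdigit, PySem.Chars.isspace,
    PySem.Chars.isupper, PySem.Chars.islower, Char.le_def, UInt32.le_iff_toNat_le] at *
  omega

theorem pv_go_nil (cur : List Char) (acc : List (List Char)) :
    PySem.Chars.split₀.go [] cur acc =
      (if cur.isEmpty then acc.reverse else (cur.reverse :: acc).reverse) := rfl

theorem pv_go_cons (c : Char) (cs cur : List Char) (acc : List (List Char)) :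
    PySem.Chars.split₀.go (c :: cs) cur acc =
      (if PySem.Chars.isspace c then
        (if cur.isEmpty then PySem.Chars.split₀.go cs [] acc
         else PySem.Chars.split₀.go cs [] (cur.reverse :: acc))
       else PySem.Chars.split₀.go cs (c :: cur) acc) := rfl

theorem pv_go_mask :
    ∀ (cs cur : List Char) (acc : List (List Char)),
      PySem.Chars.split₀.go (cs.map (fun ch => if PySem.Chars.isalnum ch then ch else ' ')) cur acc =
        acc.reverse ++
          (if cur.isEmpty then pvD cs
           else (cur.reverse ++ cs.takeWhile PySem.Chars.isalnum) ::
             pvD (cs.dropWhile PySem.Chars.isalnum)) := by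
  intro cs
  induction cs with
  | nil =>
    intro cur acc
    cases cur with
    | nil => simp [pv_go_nil, pvD]
    | cons x xs => simp [pv_go_nil, pvD]
  | cons c rest ih =>
    intro cur acc
    by_cases h : PySem.Chars.isalnum c = true
    · have hs : PySem.Chars.isspace c = false := pv_alnum_not_space c h
      rw [List.map_cons, if_pos h, pv_go_cons, if_neg (by simp [hs]), ih (c :: cur) acc]
      cases cur with
      | nil => simp [pvD, h]
      | cons x xs => simp [h]
    · have h' : PySem.Chars.isalnum c = false := by simpa using h
      have hs : PySem.Chars.isspace ' ' = true := by decide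
      rw [List.map_cons, if_neg (by simp [h']), pv_go_cons, if_pos hs]
      cases cur with
      | nil =>
        rw [List.isEmpty_nil, if_pos rfl, ih [] acc]
        simp [pvD, h']
      | cons x xs =>
        rw [List.isEmpty_cons, if_neg (by simp), ih [] ((x :: xs).reverse :: acc)]
        simp [pvD, h']

theorem pv_splitmask (cs : List Char) :
    PySem.Chars.split₀ (cs.map (fun ch => if PySem.Chars.isalnum ch then ch else ' ')) = pvD cs := by
  simpa [PySem.Chars.split₀] using pv_go_mask cs [] []

theorem pvD_skip (l : List Char) :
    pvD (l.dropWhile (fun x => !PySem.Chars.isalnum x)) = pvD l := by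
  induction l with
  | nil => simp
  | cons c rest ih =>
    by_cases h : PySem.Chars.isalnum c = true
    · simp [h]
    · have h' : PySem.Chars.isalnum c = false := by simpa using h
      rw [List.dropWhile_cons, if_pos (by simp [h']), ih]
      simp [pvD, h']

theorem pvTokenRuns_eq_aux :
    ∀ (n : Nat) (cs : List Char), cs.length ≤ n →
      pvTokenRuns cs = ((pvD cs).filter (fun t => 2 ≤ t.length)).map String.ofList := by
  have hbt : ∀ b : Bool, (b == true) = b := by simp
  have hbf : ∀ b : Bool, (b == false) = !b := by simp
  intro n
  induction n with
  | zero =>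
    intro cs h
    have : cs = [] := List.eq_nil_of_length_eq_zero (Nat.le_zero.mp h)
    subst this
    simp [pvTokenRuns, pvD]
  | succ n ih =>
    intro cs h
    cases cs with
    | nil => simp [pvTokenRuns, pvD]
    | cons c rest =>
      have hrest : rest.length ≤ n := by simpa using h
      by_cases hk : PySem.Chars.isalnum c = true
      · have hdw : (rest.dropWhile PySem.Chars.isalnum).length ≤ n :=
          le_trans (List.length_dropWhile_le _ _) hrest
        by_cases hg : 2 ≤ (c :: rest.takeWhile PySem.Chars.isalnum).length
        · rw [pvTokenRuns]
          simp only [hk]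
          simp only [hbt]
          rw [if_pos (by simpa using hg)]
          rw [ih _ hdw]
          have h1 : 1 ≤ (rest.takeWhile PySem.Chars.isalnum).length := by
            simp only [List.length_cons] at hg; omega
          simp [pvD, hk, List.filter_cons, h1]
        · rw [pvTokenRuns]
          simp only [hk]
          simp only [hbt]
          rw [if_neg (by simpa using hg)]
          rw [ih _ hdw]
          have h0 : (rest.takeWhile PySem.Chars.isalnum).length = 0 := by
            simp only [List.length_cons] at hg; omega
          have hdrop : rest.dropWhile PySem.Chars.isalnum = rest := by
            cases rest with
            | nil => rfl
            | cons r rs =>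
              have hr : PySem.Chars.isalnum r = false := by
                by_contra hrc
                have hr' : PySem.Chars.isalnum r = true := by simpa using hrc
                simp [List.takeWhile_cons, hr'] at h0
              simp [List.dropWhile_cons, hr]
          simp [pvD, hk, List.filter_cons, h0, hdrop]
      · have hk' : PySem.Chars.isalnum c = false := by simpa using hk
        have hdw : (rest.dropWhile (fun x => !PySem.Chars.isalnum x)).length ≤ n :=
          le_trans (List.length_dropWhile_le _ _) hrest
        rw [pvTokenRuns]
        simp only [hk']
        simp only [hbf]
        rw [if_neg (by simp)]
        rw [ih _ hdw, pvD_skip]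
        simp [pvD, hk']

theorem pvTokenRuns_eq (cs : List Char) :
    pvTokenRuns cs = ((pvD cs).filter (fun t => 2 ≤ t.length)).map String.ofList :=
  pvTokenRuns_eq_aux cs.length cs le_rfl

theorem pv_pyRange_nat (m : Nat) :
    ∀ (a : Int), PySem.List.pyRange a (a + (m : Int)) 1 = (List.range m).map (fun (j : Nat) => a + (j : Int)) := by
  induction m with
  | zero => intro a; simp [PySem.List.pyRange]
  | succ n ih =>
    intro a
    have h1 : a < a + ((n : Int) + 1) := by omega
    rw [show ((n + 1 : Nat) : Int) = (n : Int) + 1 by push_cast; ring]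
    rw [PySem.List.pyRange_one_cons h1]
    rw [show a + ((n : Int) + 1) = (a + 1) + (n : Int) by ring, ih (a + 1),
      List.range_succ_eq_map, List.map_cons, List.map_map]
    refine congrArg₂ _ (by simp) ?_
    refine List.map_congr_left ?_
    intro j _
    simp only [Function.comp_apply]
    push_cast
    ring

theorem pv_trigram_chars (cs : List Char) :
    (List.range (cs.length - 2)).map (fun j => (cs.drop j).take 3) =
      (cs.zip ((cs.drop 1).zip (cs.drop 2))).map (fun p => [p.1, p.2.1, p.2.2]) := by
  induction cs with
  | nil => simp
  | cons a rest ih =>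
    cases rest with
    | nil => simp
    | cons b rest' =>
      cases rest' with
      | nil => simp
      | cons c t =>
        have hlen : (a :: b :: c :: t).length - 2 = t.length + 1 := by simp
        have hlen' : (b :: c :: t).length - 2 = t.length := by simp
        rw [hlen, List.range_succ_eq_map, List.map_cons, List.map_map]
        rw [hlen'] at ih
        simp only [List.drop_succ_cons, List.drop_zero] at ih
        refine congrArg₂ _ ?_ ?_
        · simp
        · have hstep : List.map ((fun j => List.take 3 (List.drop j (a :: b :: c :: t))) ∘ Nat.succ)
              (List.range t.length) =
              List.map (fun j => List.take 3 (List.drop j (b :: c :: t))) (List.range t.length) := by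
            refine List.map_congr_left ?_
            intro j _
            simp [Function.comp]
          rw [hstep, ih]
          rfl

-- ===== VERDICT (by name: the statement is the Claim_ definition above) =====
theorem features_py_spec : Claim_equal_features_py := by
  intro text _
  unfold Spec_features_py features_py features_py_alt
  refine congrArg₂ _ ?_ ?_
  · rw [pv_splitmask, pvTokenRuns_eq]
  · set cp := (PySem.Chars.lower text.toList).filter (fun ch => !PySem.Chars.isspace ch) with hcp
    have hmax : max 0 ((cp.length : Int) - 2) = ((cp.length - 2 : Nat) : Int) := by omega
    have hslice : ∀ (j : Nat),
        PySem.List.slice cp (some (j : Int)) (some ((j : Int) + 3)) = (cp.drop j).take 3 := by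
      intro j
      have := PySem.List.slice_natCast_add cp j 3
      simpa using this
    rw [hmax]
    have hrange := pv_pyRange_nat (cp.length - 2) 0
    rw [show (0 : Int) + ((cp.length - 2 : Nat) : Int) = ((cp.length - 2 : Nat) : Int) by ring] at hrange
    rw [hrange, List.map_map]
    have hfrom1 : PySem.List.slice cp (some 1) none = cp.drop 1 := by
      have := PySem.List.slice_from cp (a := 1) (by norm_num)
      simpa using this
    have hfrom2 : PySem.List.slice cp (some 2) none = cp.drop 2 := by
      have := PySem.List.slice_from cp (a := 2) (by norm_num)
      simpa using this
    rw [hfrom1, hfrom2]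
    have key := pv_trigram_chars cp
    calc (List.range (cp.length - 2)).map
          ((fun idx => String.ofList (PySem.List.slice cp (some idx) (some (idx + 3)))) ∘ (fun (j : Nat) => (0 : Int) + (j : Int)))
        = (List.range (cp.length - 2)).map (fun j => String.ofList ((cp.drop j).take 3)) := by
          refine List.map_congr_left ?_
          intro j _
          simp [Function.comp, hslice j]
      _ = ((List.range (cp.length - 2)).map (fun j => (cp.drop j).take 3)).map String.ofList := by
          rw [List.map_map]; rfl
      _ = ((cp.zip ((cp.drop 1).zip (cp.drop 2))).map (fun p => [p.1, p.2.1, p.2.2])).map String.ofList := by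
          rw [key]
      _ = (cp.zip ((cp.drop 1).zip (cp.drop 2))).map (fun p => String.ofList [p.1, p.2.1, p.2.2]) := by
          rw [List.map_map]; rfl
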